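-- pv_equiv track=rewrite | github.com/rmngllnn/perceptron-POS-TAL1 | perceptron_basics.py | predict_tag
-- ===== SOURCE A (Python) =====
-- def predict_tag(vector, weights, tag_list):
-- 	"""Predicts and returns the tag of a word.
--
-- 	vector: features of the word, as calculated/formatted by get_word_vector
-- 	weights: the weights for each feature in the prediction
-- 	tag_list: possible tags
-- 	"""
--
-- 	scores = {}
-- 	for tag in tag_list:
-- 		scores[tag] = 0
-- 		for feature in vector:
-- 			if feature not in weights:
-- 				weights[feature] = {}
-- 			weights_feature = weights[feature]
-- 			scores[tag] += weights_feature.get(tag,0) * vector[feature]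
--
-- 	return max(scores, key=lambda tag: (scores[tag], tag))
-- ===== SOURCE B (Python) =====
-- def predict_tag(vector, weights, tag_list):
--     """Predicts and returns the tag of a word.
--
--     Feature-major sparse accumulation: iterate the feature vector once and,
--     for each feature, add contributions only for the tags that actually
--     appear in that feature's weight dict.  Does not mutate `weights`
--     (the original inserted empty dicts for unseen features); the return
--     value is identical.
--     """
--     scores = dict.fromkeys(tag_list, 0)
--     for feature, value in vector.items():
--         for tag, weight in weights.get(feature, {}).items():
--             if tag in scores:
--                 scores[tag] += weight * value
--     return max(scores, key=lambda tag: (scores[tag], tag))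
-- ===== Notes on version B (the rewrite author's own statement) =====
-- stated objective: faster
-- what changed: B replaces A's tag-major double loop (for every tag, scan every feature and look its weight up) by a single feature-major pass that adds each feature's sparse weight-dict entries directly into a score table initialised to zero, so work is proportional to the stored weights instead of tags*features; B also does not mutate `weights` (A inserts empty dicts for unseen features) - the return value is identical.
import Mathlib
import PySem

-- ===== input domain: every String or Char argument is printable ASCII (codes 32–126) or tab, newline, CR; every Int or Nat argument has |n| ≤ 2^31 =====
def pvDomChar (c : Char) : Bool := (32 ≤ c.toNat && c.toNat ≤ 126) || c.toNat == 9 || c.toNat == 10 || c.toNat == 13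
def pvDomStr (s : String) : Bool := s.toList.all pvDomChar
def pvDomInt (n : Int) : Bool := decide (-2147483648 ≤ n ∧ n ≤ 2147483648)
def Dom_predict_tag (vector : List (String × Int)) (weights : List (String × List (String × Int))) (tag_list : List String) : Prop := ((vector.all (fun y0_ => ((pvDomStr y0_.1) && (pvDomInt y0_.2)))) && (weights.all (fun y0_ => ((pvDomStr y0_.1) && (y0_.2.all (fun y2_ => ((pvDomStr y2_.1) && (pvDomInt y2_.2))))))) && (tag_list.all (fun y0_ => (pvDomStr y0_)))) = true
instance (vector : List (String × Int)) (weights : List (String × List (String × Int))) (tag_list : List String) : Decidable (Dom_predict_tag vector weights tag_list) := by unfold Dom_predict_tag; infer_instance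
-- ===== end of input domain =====

-- B replaces A's tag-major double loop by one feature-major pass over the sparse weight dicts (asymptotically
-- less work); equivalence is about the RETURN value only: A mutates `weights` (inserts {} for unseen features), B does not.

-- Both Pythons receive dicts; these decode the association-list arguments into dicts (argument decoding, shared).
def pvVec (vector : List (String × Int)) : PySem.Dict String Int := PySem.Dict.ofList vector

def pvWts (weights : List (String × List (String × Int))) : PySem.Dict String (PySem.Dict String Int) :=
  PySem.Dict.ofList (weights.map (fun p => (p.1, PySem.Dict.ofList p.2)))

-- `max(scores, key=lambda tag: (scores[tag], tag))` — the identical final line of both Pythons.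
def pvArgmax (sc : PySem.Dict String Int) : String :=
  (PySem.List.max2? sc.keys (fun t => sc.getD t 0) (fun t => t)).getD ""

-- ===== PORT A =====
-- inner loop body: `if feature not in weights: weights[feature] = {}` then `scores[tag] += weights[feature].get(tag,0) * vector[feature]`
def pvStepA (vd : PySem.Dict String Int) (tag : String)
    (st : PySem.Dict String Int × PySem.Dict String (PySem.Dict String Int)) (feature : String) :
    PySem.Dict String Int × PySem.Dict String (PySem.Dict String Int) :=
  let w := if st.2.contains feature then st.2 else st.2.insert feature PySem.Dict.empty
  (st.1.modify tag 0 (· + (w.getD feature PySem.Dict.empty).getD tag 0 * vd.getD feature 0), w)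

-- outer loop body: `scores[tag] = 0` then `for feature in vector: …`
def pvOuterA (vd : PySem.Dict String Int)
    (st : PySem.Dict String Int × PySem.Dict String (PySem.Dict String Int)) (tag : String) :
    PySem.Dict String Int × PySem.Dict String (PySem.Dict String Int) :=
  vd.keys.foldl (pvStepA vd tag) (st.1.insert tag 0, st.2)

def predict_tag (vector : List (String × Int)) (weights : List (String × List (String × Int))) (tag_list : List String) : String :=
  pvArgmax (tag_list.foldl (pvOuterA (pvVec vector)) (PySem.Dict.empty, pvWts weights)).1

-- ===== PORT B =====
-- inner loop body: `if tag in scores: scores[tag] += weight * value`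
def pvStepB (value : Int) (sc : PySem.Dict String Int) (tw : String × Int) : PySem.Dict String Int :=
  if sc.contains tw.1 then sc.modify tw.1 0 (· + tw.2 * value) else sc

-- outer loop body: `for tag, weight in weights.get(feature, {}).items(): …`
def pvOuterB (wd : PySem.Dict String (PySem.Dict String Int))
    (sc : PySem.Dict String Int) (fv : String × Int) : PySem.Dict String Int :=
  (wd.getD fv.1 PySem.Dict.empty).items.foldl (pvStepB fv.2) sc

def predict_tag_alt (vector : List (String × Int)) (weights : List (String × List (String × Int))) (tag_list : List String) : String :=
  pvArgmax ((pvVec vector).items.foldl (pvOuterB (pvWts weights))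
    (PySem.Dict.ofList (tag_list.map (fun t => (t, (0 : Int))))))

-- ===== PRECONDITION & SPEC =====
-- Python A raises ValueError (max of an empty dict) when tag_list is empty; that is all Pre_ excludes.
def Pre_predict_tag (vector : List (String × Int)) (weights : List (String × List (String × Int))) (tag_list : List String) : Prop := tag_list ≠ []
instance (vector : List (String × Int)) (weights : List (String × List (String × Int))) (tag_list : List String) : Decidable (Pre_predict_tag vector weights tag_list) := by unfold Pre_predict_tag; infer_instance

def pvWitness_predict_tag : (List (String × Int)) × (List (String × List (String × Int))) × List String :=
  ([("f1", 2)], [("f1", [("N", 3)])], ["N", "V"])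

def Spec_predict_tag (vector : List (String × Int)) (weights : List (String × List (String × Int))) (tag_list : List String) (out : String) : Prop := out = predict_tag_alt vector weights tag_list
instance (vector : List (String × Int)) (weights : List (String × List (String × Int))) (tag_list : List String) (out : String) : Decidable (Spec_predict_tag vector weights tag_list out) := by unfold Spec_predict_tag; infer_instance

-- ===== CLAIM (what is proved, stated in full; the proofs are below) =====
def Claim_equal_predict_tag : Prop := ∀ (vector : List (String × Int)) (weights : List (String × List (String × Int))) (tag_list : List String), Dom_predict_tag vector weights tag_list → Pre_predict_tag vector weights tag_list → Spec_predict_tag vector weights tag_list (predict_tag vector weights tag_list)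

-- ===== LEMMAS AND PROOFS =====

-- the score each tag ends up with, written over the feature dict's items (B's traversal order)
def pvScore (vd : PySem.Dict String Int) (wd : PySem.Dict String (PySem.Dict String Int)) (t : String) : Int :=
  (vd.items.map (fun fv => ((wd.getD fv.1 PySem.Dict.empty).getD t 0) * fv.2)).sum

lemma pvScore_keys (vd : PySem.Dict String Int) (wd : PySem.Dict String (PySem.Dict String Int)) (t : String)
    (hnd : vd.keys.Nodup) :
    (vd.keys.map (fun f => ((wd.getD f PySem.Dict.empty).getD t 0) * vd.getD f 0)).sum = pvScore vd wd t := by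
  unfold pvScore
  rw [show vd.keys = vd.items.map (·.1) from rfl, List.map_map]
  congr 1
  apply List.map_congr_left
  intro fv hfv
  have h : vd.getD fv.1 0 = fv.2 :=
    PySem.Dict.getD_of_mem_items vd (by rw [Prod.mk.eta]; exact hfv) hnd 0
  simp [Function.comp, h]

lemma pvInnerA (vd : PySem.Dict String Int) (wd : PySem.Dict String (PySem.Dict String Int)) (tag : String) :
    ∀ (L : List String) (sc : PySem.Dict String Int) (w : PySem.Dict String (PySem.Dict String Int)),
      (∀ f, w.getD f PySem.Dict.empty = wd.getD f PySem.Dict.empty) →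
      sc.contains tag = true →
      (∀ f, (L.foldl (pvStepA vd tag) (sc, w)).2.getD f PySem.Dict.empty = wd.getD f PySem.Dict.empty) ∧
      (L.foldl (pvStepA vd tag) (sc, w)).1.keys = sc.keys ∧
      (∀ x, x ≠ tag → (L.foldl (pvStepA vd tag) (sc, w)).1.getD x 0 = sc.getD x 0) ∧
      (L.foldl (pvStepA vd tag) (sc, w)).1.getD tag 0
        = sc.getD tag 0 + (L.map (fun f => ((wd.getD f PySem.Dict.empty).getD tag 0) * vd.getD f 0)).sum := by
  intro L
  induction L with
  | nil => intro sc w hw hc; exact ⟨hw, rfl, fun _ _ => rfl, by simp⟩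
  | cons f L ih =>
    intro sc w hw hc
    simp only [List.foldl_cons]
    -- the one step
    set w' := if w.contains f then w else w.insert f PySem.Dict.empty with hw'def
    have hw' : ∀ g, w'.getD g PySem.Dict.empty = wd.getD g PySem.Dict.empty := by
      intro g
      rw [hw'def]
      by_cases hcf : w.contains f = true
      · simp [hcf, hw g]
      · simp only [Bool.not_eq_true] at hcf
        rw [hcf]
        simp only [Bool.false_eq_true, if_false]
        rw [PySem.Dict.getD_insert]
        split_ifs with hg
        · subst hg
          rw [← hw g, PySem.Dict.getD_of_not_contains _ _ hcf]
        · exact hw g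
    have hstep : pvStepA vd tag (sc, w) f
        = (sc.modify tag 0 (· + ((wd.getD f PySem.Dict.empty).getD tag 0) * vd.getD f 0), w') := by
      unfold pvStepA
      simp only [← hw'def]
      rw [hw' f]
    rw [hstep]
    have hkeys : (sc.modify tag 0 (· + ((wd.getD f PySem.Dict.empty).getD tag 0) * vd.getD f 0)).keys = sc.keys := by
      rw [PySem.Dict.keys_modify, PySem.Dict.keys_insert_of_contains _ _ hc]
    have hc' : (sc.modify tag 0 (· + ((wd.getD f PySem.Dict.empty).getD tag 0) * vd.getD f 0)).contains tag = true := by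
      rw [PySem.Dict.contains_modify]; simp
    obtain ⟨ih1, ih2, ih3, ih4⟩ := ih _ w' hw' hc'
    refine ⟨ih1, by rw [ih2, hkeys], ?_, ?_⟩
    · intro x hx
      rw [ih3 x hx, PySem.Dict.getD_modify]
      simp [hx]
    · rw [ih4, PySem.Dict.getD_modify]
      simp only [if_true, List.map_cons, List.sum_cons]
      ring

lemma pvOuterA_spec (vd : PySem.Dict String Int) (wd : PySem.Dict String (PySem.Dict String Int))
    (hvnd : vd.keys.Nodup) :
    ∀ (P : List String) (sc : PySem.Dict String Int) (w : PySem.Dict String (PySem.Dict String Int)),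
      (∀ f, w.getD f PySem.Dict.empty = wd.getD f PySem.Dict.empty) →
      sc.keys.Nodup →
      (P.foldl (pvOuterA vd) (sc, w)).1.keys = PySem.Set.update sc.keys P ∧
      (P.foldl (pvOuterA vd) (sc, w)).1.keys.Nodup ∧
      (∀ x, (P.foldl (pvOuterA vd) (sc, w)).1.getD x 0
        = if x ∈ P then pvScore vd wd x else sc.getD x 0) := by
  intro P
  induction P with
  | nil => intro sc w hw hnd; exact ⟨rfl, hnd, fun x => by simp⟩
  | cons tag P ih =>
    intro sc w hw hnd
    simp only [List.foldl_cons]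
    have hc0 : (sc.insert tag (0 : Int)).contains tag = true := PySem.Dict.contains_insert_self sc tag 0
    obtain ⟨h1, h2, h3, h4⟩ := pvInnerA vd wd tag vd.keys (sc.insert tag 0) w hw hc0
    have houter : pvOuterA vd (sc, w) tag = (vd.keys.foldl (pvStepA vd tag) (sc.insert tag 0, w)) := rfl
    set r1 := vd.keys.foldl (pvStepA vd tag) (sc.insert tag 0, w) with hr1
    -- keys after one outer step
    have hk1 : r1.1.keys = PySem.Set.add sc.keys tag := by
      rw [h2]
      by_cases hct : sc.contains tag = true
      · rw [PySem.Dict.keys_insert_of_contains _ _ hct,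
          PySem.Set.add_of_mem ((PySem.Dict.contains_iff_mem_keys sc tag).mp hct)]
      · simp only [Bool.not_eq_true] at hct
        rw [PySem.Dict.keys_insert_of_not_contains _ _ hct,
          PySem.Set.add_of_not_mem (by
            intro hmem
            rw [← PySem.Dict.contains_iff_mem_keys] at hmem
            rw [hct] at hmem
            exact Bool.false_ne_true hmem)]
    have hnd1 : r1.1.keys.Nodup := by
      rw [hk1]
      exact PySem.Set.nodup_add _ _ hnd
    -- values after one outer step
    have hv1 : ∀ x, r1.1.getD x 0 = if x = tag then pvScore vd wd x else sc.getD x 0 := by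
      intro x
      by_cases hx : x = tag
      · subst hx
        rw [h4, PySem.Dict.getD_insert]
        simp only [if_true, zero_add]
        exact pvScore_keys vd wd x hvnd
      · rw [if_neg hx, h3 x hx, PySem.Dict.getD_insert, if_neg hx]
    obtain ⟨ihk, ihnd, ihv⟩ := ih r1.1 r1.2 h1 hnd1
    rw [houter, show r1 = (r1.1, r1.2) from rfl]
    refine ⟨?_, ihnd, ?_⟩
    · rw [ihk, hk1, ← PySem.Set.update_cons]
    · intro x
      rw [ihv x]
      by_cases hxP : x ∈ P
      · simp [hxP]
      · rw [if_neg hxP, hv1 x]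
        by_cases hxt : x = tag
        · subst hxt; simp
        · simp [hxt, hxP]

lemma pvSumItems (x : String) (v : Int) :
    ∀ (l : List (String × Int)), (l.map (·.1)).Nodup →
      (l.map (fun tw => if tw.1 = x then tw.2 * v else 0)).sum = (PySem.Dict.mk l).getD x 0 * v := by
  intro l
  induction l with
  | nil =>
    intro _
    rw [PySem.Dict.getD_eq_get?_getD,
      show (PySem.Dict.mk ([] : List (String × Int))).get? x = none from rfl]
    simp
  | cons hd tl ih =>
    intro hnd
    simp only [List.map_cons, List.nodup_cons, List.mem_map] at hnd ⊢
    rw [List.sum_cons]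
    rw [PySem.Dict.getD_eq_get?_getD, PySem.Dict.get?_mk_cons]
    by_cases hx : hd.1 = x
    · have htl : (tl.map (fun tw => if tw.1 = x then tw.2 * v else 0)).sum = 0 := by
        apply List.sum_eq_zero
        intro z hz
        simp only [List.mem_map] at hz
        obtain ⟨tw, htw, hzeq⟩ := hz
        have : tw.1 ≠ x := by
          intro he
          exact hnd.1 ⟨tw, htw, by rw [he, hx]⟩
        simp [this] at hzeq
        omega
      simp [hx, htl]
    · have hbeq : (hd.1 == x) = false := by simp [hx]
      rw [if_neg hx, hbeq]
      simp only [Bool.false_eq_true, if_false, zero_add]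
      rw [ih hnd.2, PySem.Dict.getD_eq_get?_getD]

lemma pvInnerB (v : Int) :
    ∀ (L : List (String × Int)) (sc : PySem.Dict String Int),
      (L.foldl (pvStepB v) sc).keys = sc.keys ∧
      (∀ x, (L.foldl (pvStepB v) sc).getD x 0
        = sc.getD x 0 + (if sc.contains x then (L.map (fun tw => if tw.1 = x then tw.2 * v else 0)).sum else 0)) := by
  intro L
  induction L with
  | nil =>
    intro sc
    refine ⟨rfl, fun x => ?_⟩
    simp only [List.foldl_nil, List.map_nil, List.sum_nil]
    split_ifs <;> simp
  | cons tw L ih =>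
    intro sc
    simp only [List.foldl_cons]
    by_cases hct : sc.contains tw.1 = true
    · have hstep : pvStepB v sc tw = sc.modify tw.1 0 (· + tw.2 * v) := by
        unfold pvStepB; rw [if_pos hct]
      rw [hstep]
      set sc' := sc.modify tw.1 0 (· + tw.2 * v) with hsc'
      have hk : sc'.keys = sc.keys := by
        rw [hsc', PySem.Dict.keys_modify,
          PySem.Dict.keys_insert_of_contains _ _ hct]
      have hcs : ∀ y, sc'.contains y = sc.contains y := by
        intro y
        rw [PySem.Dict.contains_eq_decide_mem_keys, PySem.Dict.contains_eq_decide_mem_keys, hk]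
      obtain ⟨ihk, ihv⟩ := ih sc'
      refine ⟨by rw [ihk, hk], fun x => ?_⟩
      rw [ihv x, hcs x]
      rw [hsc', PySem.Dict.getD_modify]
      simp only [List.map_cons, List.sum_cons]
      by_cases hx : x = tw.1
      · subst hx
        rw [if_pos rfl, if_pos hct, if_pos hct, if_pos rfl]
        ring
      · rw [if_neg hx, if_neg (show ¬ tw.1 = x from fun he => hx he.symm)]
        split_ifs <;> simp
    · have hstep : pvStepB v sc tw = sc := by
        unfold pvStepB; rw [if_neg hct]
      rw [hstep]
      obtain ⟨ihk, ihv⟩ := ih sc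
      refine ⟨ihk, fun x => ?_⟩
      rw [ihv x]
      simp only [List.map_cons, List.sum_cons]
      by_cases hcx : sc.contains x = true
      · rw [if_pos hcx, if_pos hcx]
        have hx : tw.1 ≠ x := by
          intro he
          rw [he] at hct
          exact hct hcx
        rw [if_neg hx]
        ring
      · simp only [Bool.not_eq_true] at hcx
        rw [hcx]
        simp

lemma pvWtsVals_nodup (weights : List (String × List (String × Int))) :
    ∀ f, ((pvWts weights).getD f PySem.Dict.empty).keys.Nodup := by
  have vals : ∀ (l : List (String × PySem.Dict String Int)) (d : PySem.Dict String (PySem.Dict String Int)),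
      (∀ u ∈ d.values, u.keys.Nodup) → (∀ p ∈ l, p.2.keys.Nodup) →
      ∀ u ∈ (l.foldl (fun d p => d.insert p.1 p.2) d).values, u.keys.Nodup := by
    intro l
    induction l with
    | nil => intro d hd _ u hu; exact hd u hu
    | cons p l ihl =>
      intro d hd hl u hu
      refine ihl (d.insert p.1 p.2) ?_ (fun q hq => hl q (List.mem_cons_of_mem _ hq)) u hu
      intro z hz
      rcases PySem.Dict.mem_values_insert d p.1 p.2 z hz with h | h
      · rw [h]; exact hl p (List.mem_cons_self) 
      · exact hd z h
  intro f
  rw [PySem.Dict.getD_eq_get?_getD]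
  cases hg : (pvWts weights).get? f with
  | none => exact List.nodup_nil
  | some u =>
    simp only [Option.getD_some]
    have hmem : u ∈ (pvWts weights).values := by
      have := PySem.Dict.mem_items_of_get?_eq_some _ hg
      exact List.mem_map.mpr ⟨(f, u), this, rfl⟩
    have hmem' : u ∈ (List.foldl (fun (d : PySem.Dict String (PySem.Dict String Int)) p => d.insert p.1 p.2)
        PySem.Dict.empty (weights.map (fun p => (p.1, PySem.Dict.ofList p.2)))).values := hmem
    have h1 : ∀ z ∈ (PySem.Dict.empty : PySem.Dict String (PySem.Dict String Int)).values, z.keys.Nodup := by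
      intro z hz
      exact absurd hz (by intro h; cases h)
    have h2 : ∀ p ∈ weights.map (fun p => (p.1, PySem.Dict.ofList p.2)), p.2.keys.Nodup := by
      intro p hp
      obtain ⟨q, _, hq⟩ := List.mem_map.mp hp
      rw [← hq]
      exact PySem.Dict.nodup_keys_ofList q.2
    exact vals _ _ h1 h2 u hmem'

lemma pvOuterB_spec (wd : PySem.Dict String (PySem.Dict String Int))
    (hv : ∀ f, (wd.getD f PySem.Dict.empty).keys.Nodup) :
    ∀ (F : List (String × Int)) (sc : PySem.Dict String Int),
      (F.foldl (pvOuterB wd) sc).keys = sc.keys ∧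
      (∀ x, (F.foldl (pvOuterB wd) sc).getD x 0
        = sc.getD x 0 + (if sc.contains x then (F.map (fun fv => ((wd.getD fv.1 PySem.Dict.empty).getD x 0) * fv.2)).sum else 0)) := by
  intro F
  induction F with
  | nil =>
    intro sc
    refine ⟨rfl, fun x => ?_⟩
    simp only [List.foldl_nil, List.map_nil, List.sum_nil]
    split_ifs <;> simp
  | cons fv F ih =>
    intro sc
    simp only [List.foldl_cons]
    have hin := pvInnerB fv.2 ((wd.getD fv.1 PySem.Dict.empty).items) sc
    have hstep : pvOuterB wd sc fv = (wd.getD fv.1 PySem.Dict.empty).items.foldl (pvStepB fv.2) sc := rfl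
    rw [hstep]
    set sc' := (wd.getD fv.1 PySem.Dict.empty).items.foldl (pvStepB fv.2) sc with hsc'
    obtain ⟨hk1, hv1⟩ := hin
    have hcs : ∀ y, sc'.contains y = sc.contains y := by
      intro y
      rw [PySem.Dict.contains_eq_decide_mem_keys, PySem.Dict.contains_eq_decide_mem_keys, hk1]
    obtain ⟨ihk, ihv⟩ := ih sc'
    refine ⟨by rw [ihk, hk1], fun x => ?_⟩
    rw [ihv x, hcs x, hv1 x]
    simp only [List.map_cons, List.sum_cons]
    by_cases hcx : sc.contains x = true
    · rw [if_pos hcx, if_pos hcx, if_pos hcx]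
      have hsum : ((wd.getD fv.1 PySem.Dict.empty).items.map (fun tw => if tw.1 = x then tw.2 * fv.2 else 0)).sum
          = (wd.getD fv.1 PySem.Dict.empty).getD x 0 * fv.2 := by
        have := pvSumItems x fv.2 (wd.getD fv.1 PySem.Dict.empty).items (hv fv.1)
        simpa using this
      rw [hsum]
      ring
    · simp only [Bool.not_eq_true] at hcx
      rw [hcx]
      simp

-- the zero-initialised score table: keys are the distinct tags, every value is 0
lemma pvScores0_keys (tag_list : List String) :
    (PySem.Dict.ofList (tag_list.map (fun t => (t, (0 : Int))))).keys = PySem.Set.ofList tag_list := by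
  show (List.foldl (fun d p => d.insert p.1 p.2) PySem.Dict.empty (tag_list.map (fun t => (t, (0 : Int))))).keys = _
  rw [show (fun (d : PySem.Dict String Int) (p : String × Int) => d.insert p.1 p.2)
        = (fun d p => d.insert (Prod.fst p) ((fun _ p => p.2) d p)) from rfl]
  rw [PySem.Dict.keys_foldl_insert_key _ Prod.fst]
  rw [List.map_map,
    show (Prod.fst ∘ fun t : String => (t, (0 : Int))) = id from rfl, List.map_id,
    show (PySem.Dict.empty : PySem.Dict String Int).keys = [] from rfl,
    PySem.Set.update_nil_left]

lemma pvScores0_getD (tag_list : List String) (x : String) :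
    (PySem.Dict.ofList (tag_list.map (fun t => (t, (0 : Int))))).getD x 0 = 0 := by
  show (List.foldl (fun d p => d.insert p.1 p.2) PySem.Dict.empty (tag_list.map (fun t => (t, (0 : Int))))).getD x 0 = 0
  rw [List.foldl_map]
  have key : ∀ (l : List String) (d : PySem.Dict String Int), (∀ y, d.getD y 0 = 0) →
      ∀ y, (l.foldl (fun d t => d.insert t (0 : Int)) d).getD y 0 = 0 := by
    intro l
    induction l with
    | nil => intro d hd y; simpa using hd y
    | cons t ts ih =>
      intro d hd y
      simp only [List.foldl_cons]
      refine ih _ ?_ y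
      intro z
      rw [PySem.Dict.getD_insert]
      split_ifs with h
      · rfl
      · exact hd z
  refine key tag_list PySem.Dict.empty ?_ x
  intro y
  rw [PySem.Dict.getD_eq_get?_getD,
    show (PySem.Dict.empty : PySem.Dict String Int).get? y = none from rfl]
  rfl

-- the central fact: the two programs build the SAME scores dict (same keys in the same order, same values)
lemma pvScores_eq (vector : List (String × Int)) (weights : List (String × List (String × Int))) (tag_list : List String) :
    (tag_list.foldl (pvOuterA (pvVec vector)) (PySem.Dict.empty, pvWts weights)).1
      = (pvVec vector).items.foldl (pvOuterB (pvWts weights))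
          (PySem.Dict.ofList (tag_list.map (fun t => (t, (0 : Int))))) := by
  have hvnd : (pvVec vector).keys.Nodup := PySem.Dict.nodup_keys_ofList vector
  have hemk : (PySem.Dict.empty : PySem.Dict String Int).keys = [] := rfl
  obtain ⟨hAk, hAnd, hAv⟩ := pvOuterA_spec (pvVec vector) (pvWts weights) hvnd tag_list
    PySem.Dict.empty (pvWts weights) (fun _ => rfl) (by rw [hemk]; exact List.nodup_nil)
  rw [hemk, PySem.Set.update_nil_left] at hAk
  obtain ⟨hBk, hBv⟩ := pvOuterB_spec (pvWts weights) (pvWtsVals_nodup weights)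
    (pvVec vector).items (PySem.Dict.ofList (tag_list.map (fun t => (t, (0 : Int)))))
  rw [pvScores0_keys] at hBk
  have hBnd : ((pvVec vector).items.foldl (pvOuterB (pvWts weights))
      (PySem.Dict.ofList (tag_list.map (fun t => (t, (0 : Int)))))).keys.Nodup := by
    rw [hBk]; exact PySem.Set.nodup_ofList tag_list
  apply PySem.Dict.ext
  rw [PySem.Dict.items_eq_map_keys _ hAnd 0, PySem.Dict.items_eq_map_keys _ hBnd 0, hAk, hBk]
  apply List.map_congr_left
  intro k hk
  have hkmem : k ∈ tag_list := (PySem.Set.mem_ofList tag_list k).mp hk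
  have hc0 : (PySem.Dict.ofList (tag_list.map (fun t => (t, (0 : Int))))).contains k = true := by
    rw [PySem.Dict.contains_eq_decide_mem_keys, pvScores0_keys]
    exact decide_eq_true hk
  rw [hAv k, hBv k, if_pos hkmem, pvScores0_getD, hc0, if_pos rfl, zero_add]
  rfl

-- ===== VERDICT (by name: the statement is the Claim_ definition above) =====
theorem predict_tag_spec : Claim_equal_predict_tag := by
  intro vector weights tag_list _hdom _hpre
  unfold Spec_predict_tag predict_tag predict_tag_alt
  rw [pvScores_eq]
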